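-- pv_equiv track=rewrite | github.com/timmills/tapcommand | backend/app/services/aes70_discovery.py | _extract_zone_name
-- ===== SOURCE A (Python) =====
-- def _extract_zone_name(role_path: str) -> str:
--     """Extract a human-readable zone name from role path"""
--     # Split by "/" and find meaningful parts
--     parts = role_path.split("/")
--
--     # Remove "Gain", "Volume", etc. from the end
--     parts = [p for p in parts if p.lower() not in ["gain", "volume", "level"]]
--
--     # If we have at least 2 parts, use the second-to-last (zone name)
--     if len(parts) >= 2:
--         return parts[-1]  # e.g., "Zones/Lobby" -> "Lobby"
--     elif len(parts) == 1:
--         return parts[0]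
--     else:
--         return "Unknown Zone"
-- ===== SOURCE B (Python) =====
-- def _extract_zone_name(role_path: str) -> str:
--     """Extract a human-readable zone name from role path"""
--     # Single character-level pass: segments are assembled on the fly and the
--     # last meaningful one seen so far is kept; no list of parts is built.
--     best = "Unknown Zone"
--     seg = []
--     for ch in role_path + "/":
--         if ch == "/":
--             part = "".join(seg)
--             if part.lower() not in ("gain", "volume", "level"):
--                 best = part
--             seg = []
--         else:
--             seg.append(ch)
--     return best
-- ===== Notes on version B (the rewrite author's own statement) =====
-- stated objective: alternative
-- what changed: Replaces split-into-parts, filter and index with a single character-level scan that assembles segments on the fly and keeps the last meaningful segment in an accumulator; no list of parts or filtered list is ever built.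
import Mathlib
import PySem

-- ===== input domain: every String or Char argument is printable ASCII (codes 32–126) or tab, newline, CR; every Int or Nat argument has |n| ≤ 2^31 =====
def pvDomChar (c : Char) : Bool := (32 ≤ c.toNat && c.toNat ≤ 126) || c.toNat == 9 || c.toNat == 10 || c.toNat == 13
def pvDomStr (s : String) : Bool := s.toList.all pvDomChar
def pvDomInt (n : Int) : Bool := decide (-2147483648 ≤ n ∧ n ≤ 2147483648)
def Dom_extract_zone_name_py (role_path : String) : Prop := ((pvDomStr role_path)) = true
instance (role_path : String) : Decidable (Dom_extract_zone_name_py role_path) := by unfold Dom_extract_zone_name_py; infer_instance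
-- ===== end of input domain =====

-- B replaces split-filter-index with one character-level scan keeping the last meaningful segment (objective: alternative).

-- ===== PORT A =====
-- p.lower() not in ["gain", "volume", "level"]
def pvKeep (p : String) : Bool :=
  !(["gain", "volume", "level"].contains (PySem.Str.lower p))

def extract_zone_name_py (role_path : String) : String :=
  let parts := ((PySem.Str.split? role_path "/").getD [])
  let parts := parts.filter pvKeep
  if parts.length ≥ 2 then
    (PySem.List.pyGet? parts (-1)).getD ""   -- parts[-1]; the option is some here (length ≥ 2)
  else if parts.length = 1 then
    (PySem.List.pyGet? parts 0).getD ""      -- parts[0]; the option is some here (length = 1)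
  else
    "Unknown Zone"

-- ===== PORT B =====
-- part.lower() not in ("gain", "volume", "level")
def pvKeepB (p : String) : Bool :=
  !(["gain", "volume", "level"].contains (PySem.Str.lower p))

-- the loop body: on '/' flush the current segment (updating best if meaningful), else extend it
def pvStepB (st : String × List Char) (c : Char) : String × List Char :=
  if c = '/' then
    let part := String.ofList st.2          -- "".join(seg)
    (if pvKeepB part then part else st.1, [])
  else
    (st.1, st.2 ++ [c])

def extract_zone_name_py_alt (role_path : String) : String :=
  ((role_path.toList ++ ['/']).foldl pvStepB ("Unknown Zone", [])).1

-- ===== PRECONDITION & SPEC =====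
def Spec_extract_zone_name_py (role_path : String) (out : String) : Prop := out = extract_zone_name_py_alt role_path
instance (role_path : String) (out : String) : Decidable (Spec_extract_zone_name_py role_path out) := by unfold Spec_extract_zone_name_py; infer_instance

-- ===== CLAIM (what is proved, stated in full; the proofs are below) =====
def Claim_equal_extract_zone_name_py : Prop := ∀ (role_path : String), Dom_extract_zone_name_py role_path → Spec_extract_zone_name_py role_path (extract_zone_name_py role_path)

-- ===== LEMMAS AND PROOFS =====

-- the keep-predicate on raw char segments
def pvKc (cs : List Char) : Bool := pvKeepB (String.ofList cs)

theorem pvKeep_eq_pvKeepB : pvKeep = pvKeepB := rfl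

theorem pvModifyHead_triv (l : List (List Char)) : List.modifyHead (fun t => t) l = l := by
  cases l <;> rfl

theorem pvSplitOn_cons (c : Char) (cs : List Char) :
    (c :: cs).splitOn '/' =
      if c = '/' then [] :: cs.splitOn '/' else (cs.splitOn '/').modifyHead (List.cons c) := by
  simp [List.splitOn, List.splitOnP_cons]

-- PySem's fueled splitter equals core splitOn for the single-char separator '/'
theorem pvGo_spec (fuel : Nat) :
    ∀ (l cur : List Char) (acc : List (List Char)), l.length ≤ fuel →
      PySem.Chars.splitOn.go ['/'] fuel l cur acc =
        acc.reverse ++ (l.splitOn '/').modifyHead (fun t => cur.reverse ++ t) := by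
  induction fuel with
  | zero =>
    intro l cur acc h
    have hl : l = [] := by cases l <;> simp_all
    subst hl
    rw [PySem.Chars.splitOn.go]
    simp
  | succ n ih =>
    intro l cur acc h
    cases l with
    | nil =>
      rw [PySem.Chars.splitOn.go]
      · simp
      · omega
    | cons c rest =>
      rw [PySem.Chars.splitOn.go]
      by_cases hc : c = '/'
      · subst hc
        rw [if_pos (by simp [List.isPrefixOf])]
        rw [ih _ _ _ (by simpa using Nat.le_of_succ_le_succ h)]
        simp [pvSplitOn_cons, pvModifyHead_triv]
      · rw [if_neg (by simp [List.isPrefixOf]; exact fun h' => hc h'.symm)]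
        rw [ih _ _ _ (by simpa using Nat.le_of_succ_le_succ h)]
        rw [pvSplitOn_cons, if_neg hc, List.modifyHead_modifyHead]
        congr 2
        funext t
        simp

theorem pvSplitOn_eq (cs : List Char) :
    PySem.Chars.splitOn cs ['/'] = cs.splitOn '/' := by
  unfold PySem.Chars.splitOn
  rw [pvGo_spec (cs.length + 1) cs [] [] (by omega)]
  simp [pvModifyHead_triv]

-- last-kept accumulator step
theorem pvLastKeep_cons (x : List Char) (ps : List (List Char)) (b : String) :
    ((((x :: ps).filter pvKc).getLast?).map String.ofList).getD b
      = (((ps.filter pvKc).getLast?).map String.ofList).getD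
          (if pvKc x then String.ofList x else b) := by
  rw [List.filter_cons]
  by_cases hx : pvKc x
  · rw [if_pos hx, if_pos hx]
    cases h : ps.filter pvKc with
    | nil => simp
    | cons y l =>
      rw [List.getLast?_cons_cons]
      cases hl : (y :: l).getLast? with
      | none => simp at hl
      | some z => simp
  · simp [hx]

-- B's fold, characterised against core splitOn
theorem pvFold_spec (cs : List Char) :
    ∀ (b : String) (seg : List Char),
      ((cs ++ ['/']).foldl pvStepB (b, seg)).1
        = (((((cs.splitOn '/').modifyHead (fun t => seg ++ t)).filter pvKc).getLast?).map String.ofList).getD b := by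
  induction cs with
  | nil =>
    intro b seg
    by_cases hs : pvKc seg <;>
      simp [pvStepB, pvKc, List.splitOn_nil] <;> simp [pvKc] at hs <;> simp [hs]
  | cons c rest ih =>
    intro b seg
    rw [List.cons_append, List.foldl_cons]
    by_cases hc : c = '/'
    · subst hc
      show ((rest ++ ['/']).foldl pvStepB (pvStepB (b, seg) '/')).1 = _
      rw [show pvStepB (b, seg) '/' = (if pvKc seg then String.ofList seg else b, []) by
        simp [pvStepB, pvKc]]
      rw [ih]
      rw [pvSplitOn_cons, if_pos rfl]
      have hmh : (([] :: rest.splitOn '/').modifyHead (fun t => seg ++ t))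
          = seg :: rest.splitOn '/' := by simp
      rw [hmh, pvLastKeep_cons]
      simp [pvModifyHead_triv]
    · show ((rest ++ ['/']).foldl pvStepB (pvStepB (b, seg) c)).1 = _
      rw [show pvStepB (b, seg) c = (b, seg ++ [c]) by simp [pvStepB, hc]]
      rw [ih]
      rw [pvSplitOn_cons, if_neg hc, List.modifyHead_modifyHead]
      have hfun : ((fun t => seg ++ t) ∘ List.cons c) = (fun t => seg ++ [c] ++ t) := by
        funext t; simp
      rw [hfun]

-- A, characterised as "last kept part, else Unknown Zone"
theorem pvA_spec (parts : List String) :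
    (let q := parts.filter pvKeep;
     if q.length ≥ 2 then (PySem.List.pyGet? q (-1)).getD ""
     else if q.length = 1 then (PySem.List.pyGet? q 0).getD ""
     else "Unknown Zone")
      = ((parts.filter pvKeep).getLast?).getD "Unknown Zone" := by
  dsimp only
  generalize parts.filter pvKeep = q
  match q with
  | [] => simp
  | [a] => simp [PySem.List.pyGet?, PySem.List.pyIdx?]
  | a :: b :: rest =>
    have hlen : 2 ≤ (a :: b :: rest).length := by simp
    rw [if_pos hlen, PySem.List.pyGet?_neg_one]
    cases hl : (a :: b :: rest).getLast? with
    | none => simp at hl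
    | some x => simp

-- ===== VERDICT (by name: the statement is the Claim_ definition above) =====
theorem extract_zone_name_py_spec : Claim_equal_extract_zone_name_py := by
  intro role_path _
  unfold Spec_extract_zone_name_py extract_zone_name_py extract_zone_name_py_alt
  rw [pvA_spec]
  rw [pvFold_spec role_path.toList "Unknown Zone" []]
  -- identify A's string parts with core splitOn
  have hsplit : (PySem.Str.split? role_path "/").getD []
      = (role_path.toList.splitOn '/').map String.ofList := by
    have h := PySem.Str.split?_map role_path "/"
    rw [show PySem.Chars.split? role_path.toList "/".toList
          = some (PySem.Chars.splitOn role_path.toList ['/']) by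
        simp [PySem.Chars.split?]] at h
    cases hs : PySem.Str.split? role_path "/" with
    | none => rw [hs] at h; simp at h
    | some ps =>
      rw [hs] at h
      simp at h
      have : ps = (PySem.Chars.splitOn role_path.toList ['/']).map String.ofList := by
        rw [← h, List.map_map]
        simp [Function.comp_def]
      rw [this, pvSplitOn_eq]
      simp
  rw [hsplit, pvKeep_eq_pvKeepB, List.filter_map,
    show pvKeepB ∘ String.ofList = pvKc from rfl, List.getLast?_map]
  simp [pvModifyHead_triv]
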